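-- pv_equiv track=rewrite | github.com/Andbet97/IS773UTP | modulo5/SW2.py | generar
-- ===== SOURCE A (Python) =====
-- def generar(escalados):
-- 	mueva = []
-- 	x = 0
-- 	y = 0
-- 	for punto in escalados:
-- 		my_x = punto[0] - x
-- 		my_y = punto[1] - y
-- 		x = punto[0]
-- 		y = punto[1]
-- 		mueva.append([my_x, my_y])
-- 	return mueva
-- ===== SOURCE B (Python) =====
-- def generar(escalados):
--     pts = list(escalados)
--     prev = [[0, 0]] + pts[:-1]
--     return [[c[0] - p[0], c[1] - p[1]] for p, c in zip(prev, pts)]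
-- ===== Notes on version B (the rewrite author's own statement) =====
-- stated objective: idiomatic
-- what changed: Replaces the mutable running x,y state with a stateless pairwise pass: each point is zipped with its predecessor (origin prepended) and the deltas come from one comprehension.
import Mathlib
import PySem

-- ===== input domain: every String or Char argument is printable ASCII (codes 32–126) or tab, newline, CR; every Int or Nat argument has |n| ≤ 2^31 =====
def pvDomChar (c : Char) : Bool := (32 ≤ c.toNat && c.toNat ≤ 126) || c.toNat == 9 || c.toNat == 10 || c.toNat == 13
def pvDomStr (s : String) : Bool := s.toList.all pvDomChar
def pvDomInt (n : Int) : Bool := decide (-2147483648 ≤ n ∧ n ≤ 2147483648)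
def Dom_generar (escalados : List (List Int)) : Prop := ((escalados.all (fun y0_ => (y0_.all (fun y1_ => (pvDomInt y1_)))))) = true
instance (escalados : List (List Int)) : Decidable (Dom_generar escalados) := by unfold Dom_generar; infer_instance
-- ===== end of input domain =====

-- ===== PORT A =====
-- B computes the same deltas by zipping each point with its predecessor instead of threading x,y state (idiomatic; return-value equivalence only).
-- A's loop: structural recursion over the points with accumulator state (x, y, mueva).
def generarGo (pts : List (List Int)) (x y : Int) (mueva : List (List Int)) : List (List Int) :=
  match pts with
  | [] => mueva
  | punto :: rest =>
    let my_x := (PySem.List.pyGet? punto 0).getD 0 - x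
    let my_y := (PySem.List.pyGet? punto 1).getD 0 - y
    generarGo rest ((PySem.List.pyGet? punto 0).getD 0) ((PySem.List.pyGet? punto 1).getD 0)
      (mueva ++ [[my_x, my_y]])

def generar (escalados : List (List Int)) : List (List Int) :=
  generarGo escalados 0 0 []

-- ===== PORT B =====
def generar_alt (escalados : List (List Int)) : List (List Int) :=
  let pts := escalados
  let prev := [0, 0] :: pts.dropLast
  List.zipWith (fun p c =>
    [(PySem.List.pyGet? c 0).getD 0 - (PySem.List.pyGet? p 0).getD 0,
     (PySem.List.pyGet? c 1).getD 0 - (PySem.List.pyGet? p 1).getD 0]) prev pts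

-- ===== PRECONDITION & SPEC =====
-- Pre_ excludes inputs where some point has fewer than two coordinates: there Python A raises IndexError.
def Pre_generar (escalados : List (List Int)) : Prop :=
  ∀ p ∈ escalados, 2 ≤ p.length
instance (escalados : List (List Int)) : Decidable (Pre_generar escalados) := by unfold Pre_generar; infer_instance
def pvWitness_generar : List (List Int) := [[1, 2], [4, 6]]
def Spec_generar (escalados : List (List Int)) (out : List (List Int)) : Prop := out = generar_alt escalados
instance (escalados : List (List Int)) (out : List (List Int)) : Decidable (Spec_generar escalados out) := by unfold Spec_generar; infer_instance

-- ===== CLAIM (what is proved, stated in full; the proofs are below) =====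
def Claim_equal_generar : Prop := ∀ (escalados : List (List Int)), Dom_generar escalados → Pre_generar escalados → Spec_generar escalados (generar escalados)

-- ===== LEMMAS AND PROOFS =====
def pvStep (p c : List Int) : List Int :=
  [(PySem.List.pyGet? c 0).getD 0 - (PySem.List.pyGet? p 0).getD 0,
   (PySem.List.pyGet? c 1).getD 0 - (PySem.List.pyGet? p 1).getD 0]

theorem pvZip_dropLast (p : List Int) (rest : List (List Int)) :
    List.zipWith pvStep ((p :: rest).dropLast) rest
      = List.zipWith pvStep (p :: rest.dropLast) rest := by
  cases rest with
  | nil => simp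
  | cons q t => rfl

theorem pvPrev_proj (p : List Int) (rest : List (List Int)) (d : List (List Int)) :
    List.zipWith pvStep
      ([(PySem.List.pyGet? p 0).getD 0, (PySem.List.pyGet? p 1).getD 0] :: d) rest
      = List.zipWith pvStep (p :: d) rest := by
  cases rest with
  | nil => simp
  | cons r t =>
    simp [List.zipWith, pvStep, PySem.List.pyGet?, PySem.List.pyIdx?]

theorem generarGo_eq (pts : List (List Int)) :
    ∀ (x y : Int) (acc : List (List Int)),
    generarGo pts x y acc = acc ++ List.zipWith pvStep ([x, y] :: pts.dropLast) pts := by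
  induction pts with
  | nil => intro x y acc; simp [generarGo]
  | cons p rest ih =>
    intro x y acc
    simp only [generarGo, ih, pvZip_dropLast, pvPrev_proj, List.zipWith]
    simp [pvStep, PySem.List.pyGet?, PySem.List.pyIdx?]

-- ===== VERDICT (by name: the statement is the Claim_ definition above) =====
theorem generar_spec : Claim_equal_generar := by
  intro escalados _ _
  show generar escalados = generar_alt escalados
  rw [generar, generarGo_eq]
  rfl
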